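-- pv_equiv track=rewrite | github.com/Elca10/OES_Comment_Project | comment_code.py | check_grammar
-- ===== SOURCE A (Python) =====
-- def check_grammar(comment, student_name):
--     ''' makes sure articles and capitalization is correct '''
--     comment = comment.strip()
--     ec = []
--     for i in range(len(comment)):
--         if i == 0:
--             ec.append(comment[0].upper())
--         elif comment[i-1] == ' ' and comment[i-2] in '.?!':
--             ec.append(comment[i].upper())
--         elif comment[i:i+len(student_name)].lower() == student_name.lower():
--             ec.append(comment[i].upper())
--         elif comment[i] == 'a' and comment[i+1] == ' ' and comment[i+2].lower() in '8aef' and comment[i+3] in '0123456789+-.!? ':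
--             ec.append('an')
--         else:
--             ec.append(comment[i])
--     return ''.join(ec)
-- ===== SOURCE B (Python) =====
-- def check_grammar(comment, student_name):
--     ''' makes sure articles and capitalization is correct '''
--     s = comment.strip()
--     n = len(s)
--     # stage 1: collect the positions to capitalize by substring searches,
--     # then apply them by direct assignment into a char list
--     caps = set() if n == 0 else {0}
--     for p in ('. ', '? ', '! '):
--         j = s.find(p)
--         while j != -1:
--             if j + 2 < n:
--                 caps.add(j + 2)
--             j = s.find(p, j + 1)
--     low = s.lower()
--     name = student_name.lower()
--     j = low.find(name)
--     while j != -1: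
--         if j < n:
--             caps.add(j)
--         j = low.find(name, j + 1)
--     t = list(s)
--     for i in caps:
--         t[i] = t[i].upper()
--     # stage 2: a separate pass over the capitalized text inserts 'n' after articles
--     out = []
--     for i in range(n):
--         c = t[i]
--         out.append(c)
--         if c == 'a' and i + 3 < n and t[i+1] == ' ' and t[i+2].lower() in '8aef' and t[i+3] in '0123456789+-.!? ':
--             out.append('n')
--     return ''.join(out)
-- ===== Notes on version B (the rewrite author's own statement) =====
-- stated objective: faster
-- what changed: B is two staged passes instead of A's single per-character loop with interleaved rules: stage 1 locates capitalization positions by substring searches (str.find loops for '. '/'? '/'! ' and for the lowered name) and applies them by direct assignment into a char list, so A's per-index slice-and-lower name comparison disappears; stage 2 is a separate, independent pass over the already-capitalized text that inserts 'n' after articles.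
-- crash fix: On comments whose stripped text ends in 'a', or in 'a X' with X.lower() in '8aef' (and that position is not already capitalized by an earlier rule), A raises IndexError reading past the end of the string; B bounds-checks and returns the text with that trailing article unchanged. — e.g. on check_grammar("xa", "b"): A raises IndexError, B returns "Xa"
import Mathlib
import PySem

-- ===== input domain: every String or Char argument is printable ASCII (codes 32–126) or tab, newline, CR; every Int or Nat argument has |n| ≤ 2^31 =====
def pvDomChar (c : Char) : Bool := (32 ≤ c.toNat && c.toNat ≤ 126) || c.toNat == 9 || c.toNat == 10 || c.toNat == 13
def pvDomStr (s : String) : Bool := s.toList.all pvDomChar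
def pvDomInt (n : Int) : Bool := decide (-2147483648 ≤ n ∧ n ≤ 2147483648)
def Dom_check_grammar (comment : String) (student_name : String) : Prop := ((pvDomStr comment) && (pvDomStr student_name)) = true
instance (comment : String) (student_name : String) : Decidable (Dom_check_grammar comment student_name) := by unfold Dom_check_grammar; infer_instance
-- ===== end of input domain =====

-- B replaces A's single per-character loop (which re-slices and lowers the name at every index)
-- by two staged passes: capitalization positions found by substring searches and applied by direct
-- assignment, then an independent article pass over the capitalized text (objective: faster).
-- Python "c in '.?!'" on a single character c is ported as char-list membership (exact).

-- ===== PORT A =====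
-- A reads comment[i+1..i+3] without bounds checks; where Python raises IndexError the port's
-- pyGetD returns the default ' ' — exactly those inputs are excluded by Pre_check_grammar below.
def pvB2 (s : List Char) (i : Int) : Bool :=
  (PySem.List.pyGetD s (i-1) ' ' == ' ') && List.contains ".?!".toList (PySem.List.pyGetD s (i-2) ' ')

def pvB3 (s name : List Char) (i : Int) : Bool :=
  PySem.Chars.lower (PySem.List.slice s (some i) (some (i + (name.length : Int)))) == PySem.Chars.lower name

def pvChunkA (s name : List Char) (i : Int) : List Char :=
  if i == 0 then [PySem.Chars.upperChar (PySem.List.pyGetD s 0 ' ')]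
  else if pvB2 s i then [PySem.Chars.upperChar (PySem.List.pyGetD s i ' ')]
  else if pvB3 s name i then [PySem.Chars.upperChar (PySem.List.pyGetD s i ' ')]
  else if (PySem.List.pyGetD s i ' ' == 'a') && (PySem.List.pyGetD s (i+1) ' ' == ' ')
          && List.contains "8aef".toList (PySem.Chars.lowerChar (PySem.List.pyGetD s (i+2) ' '))
          && List.contains "0123456789+-.!? ".toList (PySem.List.pyGetD s (i+3) ' ')
    then ['a', 'n']
  else [PySem.List.pyGetD s i ' ']

def check_grammar (comment : String) (student_name : String) : String :=
  let s := PySem.Chars.strip comment.toList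
  let name := student_name.toList
  String.ofList ((PySem.List.pyRange 0 (PySem.List.len s)).foldl (fun ec i => ec ++ pvChunkA s name i) [])

-- ===== PORT B =====
-- the "while j != -1" find loop of Source B; the fuel argument only makes the loop total
def pvFindAll (hay pat : List Char) : Nat → Int → List Int
  | 0, _ => []
  | fuel+1, j =>
      if j == -1 then []
      else j :: pvFindAll hay pat fuel (PySem.Chars.findFrom hay pat (j+1) none)

def pvOcc (hay pat : List Char) : List Int :=
  pvFindAll hay pat (hay.length + 2) (PySem.Chars.find hay pat)

-- one punctuation pattern of Source B's "for p in ('. ', '? ', '! ')" loop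
def pvAddPunct (s : List Char) (n : Int) (caps : PySem.Set Int) (pat : List Char) : PySem.Set Int :=
  (pvOcc s pat).foldl (fun cs j => if j + 2 < n then PySem.Set.add cs (j + 2) else cs) caps

def pvCaps (s name : List Char) : PySem.Set Int :=
  let n : Int := s.length
  let caps0 : PySem.Set Int := if s.length = 0 then PySem.Set.empty else PySem.Set.ofList [0]
  let caps1 := [['.', ' '], ['?', ' '], ['!', ' ']].foldl (pvAddPunct s n) caps0
  (pvOcc (PySem.Chars.lower s) (PySem.Chars.lower name)).foldl
    (fun cs j => if j < n then PySem.Set.add cs j else cs) caps1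

-- Python iterates the set in hash order; each step only touches its own index, so the result is
-- order-independent, and every index is in range by construction (so list-set/getD are exact here)
def pvApplyCaps (s : List Char) (caps : PySem.Set Int) : List Char :=
  caps.foldl (fun t i => t.set i.toNat (PySem.Chars.upperChar (t.getD i.toNat ' '))) s

def check_grammar_alt (comment : String) (student_name : String) : String :=
  let s := PySem.Chars.strip comment.toList
  let n : Int := PySem.List.len s
  let t := pvApplyCaps s (pvCaps s student_name.toList)
  String.ofList ((PySem.List.pyRange 0 n).foldl (fun out i =>
    let c := PySem.List.pyGetD t i ' '
    let out := out ++ [c]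
    if (c == 'a') && decide (i + 3 < n) && (PySem.List.pyGetD t (i+1) ' ' == ' ')
        && List.contains "8aef".toList (PySem.Chars.lowerChar (PySem.List.pyGetD t (i+2) ' '))
        && List.contains "0123456789+-.!? ".toList (PySem.List.pyGetD t (i+3) ' ')
      then out ++ ['n'] else out) [])

-- ===== PRECONDITION & SPEC =====
-- pvRaisesBcore: the stripped text ends in 'a', or in "a X" with X.lower() in '8aef', at a position
-- not saved by an earlier capitalization branch — exactly where Python A raises IndexError.
def pvRaisesBcore (s name : List Char) : Bool :=
  (decide (2 ≤ s.length) && (PySem.List.pyGetD s ((s.length : Int)-1) ' ' == 'a')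
     && !(pvB2 s ((s.length : Int)-1)) && !(pvB3 s name ((s.length : Int)-1)))
  || (decide (4 ≤ s.length) && (PySem.List.pyGetD s ((s.length : Int)-3) ' ' == 'a')
     && (PySem.List.pyGetD s ((s.length : Int)-2) ' ' == ' ')
     && List.contains "8aef".toList (PySem.Chars.lowerChar (PySem.List.pyGetD s ((s.length : Int)-1) ' '))
     && !(pvB2 s ((s.length : Int)-3)) && !(pvB3 s name ((s.length : Int)-3)))

def pvRaisesB (comment : String) (student_name : String) : Bool :=
  pvRaisesBcore (PySem.Chars.strip comment.toList) student_name.toList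

-- Pre_ excludes exactly the inputs on which Python A raises IndexError in the article check.
def Pre_check_grammar (comment : String) (student_name : String) : Prop :=
  pvRaisesB comment student_name = false
instance (comment : String) (student_name : String) : Decidable (Pre_check_grammar comment student_name) := by
  unfold Pre_check_grammar; infer_instance

def pvWitness_check_grammar : String × String := ("See bob? ok", "bob")

-- On comments whose stripped text ends in 'a', or in "a X" with X.lower() in '8aef' (and that
-- position is not already capitalized by an earlier rule), A raises IndexError reading past the
-- end of the string; B bounds-checks and returns the text with that trailing article unchanged.
def Raises_check_grammar (comment : String) (student_name : String) : Prop :=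
  pvRaisesB comment student_name = true
instance (comment : String) (student_name : String) : Decidable (Raises_check_grammar comment student_name) := by
  unfold Raises_check_grammar; infer_instance

def pvRaiseWitness_check_grammar : String × String := ("xa", "b")
def pvRaiseWitnessOut_check_grammar : String := "Xa"

def Spec_check_grammar (comment : String) (student_name : String) (out : String) : Prop :=
  out = check_grammar_alt comment student_name
instance (comment : String) (student_name : String) (out : String) : Decidable (Spec_check_grammar comment student_name out) := by
  unfold Spec_check_grammar; infer_instance

-- ===== CLAIM (what is proved, stated in full; the proofs are below) =====
def Claim_equal_check_grammar : Prop := ∀ (comment : String) (student_name : String), Dom_check_grammar comment student_name → Pre_check_grammar comment student_name → Spec_check_grammar comment student_name (check_grammar comment student_name)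

def Claim_raises_check_grammar : Prop := (∀ (comment : String) (student_name : String), Dom_check_grammar comment student_name → Raises_check_grammar comment student_name → ¬ Pre_check_grammar comment student_name) ∧ (Dom_check_grammar (pvRaiseWitness_check_grammar.1) (pvRaiseWitness_check_grammar.2) ∧ Raises_check_grammar (pvRaiseWitness_check_grammar.1) (pvRaiseWitness_check_grammar.2) ∧ check_grammar_alt (pvRaiseWitness_check_grammar.1) (pvRaiseWitness_check_grammar.2) = pvRaiseWitnessOut_check_grammar)

-- ===== LEMMAS AND PROOFS =====

-- B's per-index output on the capitalized text (proof-side reshaping of B's loop body)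
def pvChunkB (t : List Char) (n i : Int) : List Char :=
  if (PySem.List.pyGetD t i ' ' == 'a') && decide (i + 3 < n) && (PySem.List.pyGetD t (i+1) ' ' == ' ')
      && List.contains "8aef".toList (PySem.Chars.lowerChar (PySem.List.pyGetD t (i+2) ' '))
      && List.contains "0123456789+-.!? ".toList (PySem.List.pyGetD t (i+3) ' ')
    then [PySem.List.pyGetD t i ' ', 'n'] else [PySem.List.pyGetD t i ' ']

-- ---------- character facts ----------
lemma pv_le_toNat (a c : Char) : a ≤ c ↔ a.toNat ≤ c.toNat := by
  rw [Char.le_def]; exact ge_iff_le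

lemma pv_toNat_ofNat (n : Nat) (h : Nat.isValidChar n) : (Char.ofNat n).toNat = n := by
  simp [Char.ofNat, Char.ofNatAux, h, Char.toNat]

lemma pv_up_toNat (c : Char) (h : PySem.Chars.islower c = true) :
    (PySem.Chars.upperChar c).toNat = c.toNat - 32 ∧ 97 ≤ c.toNat ∧ c.toNat ≤ 122 := by
  unfold PySem.Chars.islower at h
  simp only [Bool.and_eq_true, decide_eq_true_eq, pv_le_toNat] at h
  have h1 : ('a').toNat = 97 := by decide
  have h2 : ('z').toNat = 122 := by decide
  have hr : 97 ≤ c.toNat ∧ c.toNat ≤ 122 := by omega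
  refine ⟨?_, hr⟩
  unfold PySem.Chars.upperChar PySem.Chars.islower
  rw [if_pos (by simp only [Bool.and_eq_true, decide_eq_true_eq, pv_le_toNat]; omega)]
  exact pv_toNat_ofNat _ (Or.inl (by omega))

lemma pv_up_of_not (c : Char) (h : ¬ PySem.Chars.islower c = true) :
    PySem.Chars.upperChar c = c := by
  unfold PySem.Chars.upperChar
  rw [if_neg h]

lemma pv_up_ne_a (c : Char) : (PySem.Chars.upperChar c == 'a') = false := by
  apply beq_eq_false_iff_ne.mpr
  by_cases h : PySem.Chars.islower c = true
  · obtain ⟨he, h1, h2⟩ := pv_up_toNat c h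
    intro hc
    rw [hc] at he
    have : ('a').toNat = 97 := by decide
    omega
  · rw [pv_up_of_not c h]
    intro hc
    rw [hc] at h
    exact h (by decide)

lemma pv_up_space (c : Char) : (PySem.Chars.upperChar c == ' ') = (c == ' ') := by
  by_cases h : PySem.Chars.islower c = true
  · obtain ⟨he, h1, h2⟩ := pv_up_toNat c h
    have hs : (' ').toNat = 32 := by decide
    have l : (PySem.Chars.upperChar c == ' ') = false := by
      apply beq_eq_false_iff_ne.mpr
      intro hc; rw [hc] at he; omega
    have r : (c == ' ') = false := by
      apply beq_eq_false_iff_ne.mpr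
      intro hc; rw [hc] at h1; omega
    rw [l, r]
  · rw [pv_up_of_not c h]

lemma pv_lower_up (c : Char) :
    PySem.Chars.lowerChar (PySem.Chars.upperChar c) = PySem.Chars.lowerChar c := by
  by_cases h : PySem.Chars.islower c = true
  · obtain ⟨he, h1, h2⟩ := pv_up_toNat c h
    have hup : PySem.Chars.isupper (PySem.Chars.upperChar c) = true := by
      unfold PySem.Chars.isupper
      simp only [Bool.and_eq_true, decide_eq_true_eq, pv_le_toNat, he]
      constructor
      · show ('A').toNat ≤ c.toNat - 32
        have : ('A').toNat = 65 := by decide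
        omega
      · show c.toNat - 32 ≤ ('Z').toNat
        have : ('Z').toNat = 90 := by decide
        omega
    have hlow : PySem.Chars.isupper c = false := by
      unfold PySem.Chars.isupper
      simp only [Bool.and_eq_true, decide_eq_true_eq, pv_le_toNat]
      have : ('Z').toNat = 90 := by decide
      simp only [Bool.and_eq_false_iff, decide_eq_false_iff_not, pv_le_toNat]
      right; omega
    unfold PySem.Chars.lowerChar
    rw [if_pos hup, if_neg (by rw [hlow]; simp), he,
        show c.toNat - 32 + 32 = c.toNat from by omega]
    exact Char.ofNat_toNat c
  · rw [pv_up_of_not c h]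

-- ---------- character-class literals ----------
lemma pv_punct_eq : ".?!".toList = ['.', '?', '!'] := by decide

lemma pv_mem_punct (c : Char) (h : c ∈ ".?!".toList) : c = '.' ∨ c = '?' ∨ c = '!' := by
  rw [pv_punct_eq] at h
  simpa using h

lemma pv_class_eq :
    "0123456789+-.!? ".toList
      = ['0','1','2','3','4','5','6','7','8','9','+','-','.','!','?',' '] := by decide

lemma pv_class_small (c : Char) (h : c ∈ "0123456789+-.!? ".toList) : c.toNat ≤ 63 := by
  rw [pv_class_eq] at h
  simp only [List.mem_cons, List.not_mem_nil, or_false] at h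
  rcases h with rfl|rfl|rfl|rfl|rfl|rfl|rfl|rfl|rfl|rfl|rfl|rfl|rfl|rfl|rfl|rfl <;> decide


lemma pv_up_class (c : Char) :
    List.contains "0123456789+-.!? ".toList (PySem.Chars.upperChar c)
      = List.contains "0123456789+-.!? ".toList c := by
  by_cases h : PySem.Chars.islower c = true
  · obtain ⟨he, h1, h2⟩ := pv_up_toNat c h
    have l : List.contains "0123456789+-.!? ".toList (PySem.Chars.upperChar c) = false := by
      rw [← Bool.not_eq_true, List.contains_iff_mem]
      intro hm
      have := pv_class_small _ hm
      omega
    have r : List.contains "0123456789+-.!? ".toList c = false := by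
      rw [← Bool.not_eq_true, List.contains_iff_mem]
      intro hm
      have := pv_class_small _ hm
      omega
    rw [l, r]
  · rw [pv_up_of_not c h]

-- ---------- find-loop facts ----------
-- a find start past the end of the string yields -1 (CPython quirk, kept by PySem)
lemma pv_findFrom_past (s sub : List Char) (k : Nat) (h : s.length < k) :
    PySem.Chars.findFrom s sub (k : Int) none = -1 := by
  simp only [PySem.Chars.findFrom]
  split_ifs <;> first | rfl | omega

lemma pvFindAll_neg_one (hay pat : List Char) (fuel : Nat) :
    pvFindAll hay pat fuel (-1) = [] := by
  cases fuel <;> simp [pvFindAll]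

-- the find loop collects exactly the occurrence start indices ≥ k
lemma pvFindAll_mem (hay pat : List Char) (i : Nat) (hi : i < hay.length) :
    ∀ fuel k : Nat, k ≤ hay.length → hay.length - k < fuel →
      ((i : Int) ∈ pvFindAll hay pat fuel (PySem.Chars.findFrom hay pat (k : Int) none) ↔
        (k ≤ i ∧ pat <+: hay.drop i)) := by
  intro fuel
  induction fuel with
  | zero => intro k hk hf; omega
  | succ fuel ih =>
    intro k hk hf
    set j := PySem.Chars.findFrom hay pat (k : Int) none with hjdef
    by_cases hj : j = -1
    · have hninf : ¬ pat <:+: hay.drop k :=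
        (PySem.Chars.findFrom_natCast_eq_neg_one_iff hay pat k hk).mp hj
      rw [pvFindAll]
      simp only [hj, BEq.rfl, if_true, List.not_mem_nil, false_iff]
      rintro ⟨hki, hpref⟩
      apply hninf
      have h1 : hay.drop i = (hay.drop k).drop (i - k) := by
        rw [List.drop_drop]; congr 1; omega
      rw [h1] at hpref
      exact hpref.isInfix.trans (List.drop_suffix _ _).isInfix
    · obtain ⟨hkj, hpref, hmin⟩ := PySem.Chars.findFrom_natCast_spec hay pat k hk hj
      rw [← hjdef] at hkj hpref hmin
      have hj0 : (0 : Int) ≤ j := le_trans (by exact_mod_cast Nat.zero_le k) hkj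
      have hjlen : j.toNat ≤ hay.length := by
        have hfe := PySem.Chars.findFrom_natCast hay pat k hk
        rw [← hjdef] at hfe
        by_cases hr : PySem.Chars.find (hay.drop k) pat = -1
        · rw [if_pos hr] at hfe; exact absurd hfe hj
        · rw [if_neg hr] at hfe
          have h1 : PySem.Chars.find (hay.drop k) pat ≤ ((hay.drop k).length : Int) :=
            PySem.Chars.find_le_length _ _
          rw [List.length_drop] at h1
          omega
      have hkj' : k ≤ j.toNat := by omega
      rw [pvFindAll]
      have hjne : (j == -1) = false := by simp [hj]
      rw [hjne]
      simp only [Bool.false_eq_true, if_false]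
      have hcast : j + 1 = ((j.toNat + 1 : Nat) : Int) := by omega
      rw [hcast]
      by_cases hend : j.toNat = hay.length
      · have hname : pat = [] := by
          have h2 := hpref
          rw [hend, List.drop_length] at h2
          exact List.prefix_nil.mp h2
        have hkeq : j = (k : Int) := by
          have hfe := PySem.Chars.findFrom_natCast hay pat k hk
          rw [← hjdef, hname, PySem.Chars.find_nil] at hfe
          simpa using hfe
        have hklen : k = hay.length := by omega
        rw [pv_findFrom_past hay pat (j.toNat + 1) (by omega), pvFindAll_neg_one]
        simp only [List.mem_singleton]
        constructor
        · intro h; exfalso; omega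
        · rintro ⟨hki, _⟩; exfalso; omega
      · have ihm := ih (j.toNat + 1) (by omega) (by omega)
        rw [List.mem_cons, ihm]
        constructor
        · rintro (h | ⟨h1, h2⟩)
          · have hij : i = j.toNat := by omega
            exact ⟨by omega, by rw [hij]; exact hpref⟩
          · exact ⟨by omega, h2⟩
        · rintro ⟨hki, hpref_i⟩
          by_cases hij : i = j.toNat
          · left; omega
          · right
            refine ⟨?_, hpref_i⟩
            by_contra hlt
            exact (hmin i hki (by omega)) hpref_i

-- every element the find loop collects is an index 0 ≤ x ≤ len
lemma pvFindAll_bounds (hay pat : List Char) :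
    ∀ (fuel : Nat) (k : Nat), k ≤ hay.length →
      ∀ x ∈ pvFindAll hay pat fuel (PySem.Chars.findFrom hay pat (k : Int) none),
        0 ≤ x ∧ x ≤ (hay.length : Int) := by
  intro fuel
  induction fuel with
  | zero => intro k hk x hx; simp [pvFindAll] at hx
  | succ fuel ih =>
    intro k hk x hx
    set j := PySem.Chars.findFrom hay pat (k : Int) none with hjdef
    by_cases hj : j = -1
    · rw [pvFindAll] at hx
      simp [hj] at hx
    · obtain ⟨hkj, hpref, hmin⟩ := PySem.Chars.findFrom_natCast_spec hay pat k hk hj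
      rw [← hjdef] at hkj
      have hj0 : (0 : Int) ≤ j := le_trans (by exact_mod_cast Nat.zero_le k) hkj
      have hjlen : j.toNat ≤ hay.length := by
        have hfe := PySem.Chars.findFrom_natCast hay pat k hk
        rw [← hjdef] at hfe
        by_cases hr : PySem.Chars.find (hay.drop k) pat = -1
        · rw [if_pos hr] at hfe; exact absurd hfe hj
        · rw [if_neg hr] at hfe
          have h1 : PySem.Chars.find (hay.drop k) pat ≤ ((hay.drop k).length : Int) :=
            PySem.Chars.find_le_length _ _
          rw [List.length_drop] at h1
          omega
      rw [pvFindAll] at hx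
      have hjne : (j == -1) = false := by simp [hj]
      rw [hjne] at hx
      simp only [Bool.false_eq_true, if_false, List.mem_cons] at hx
      rcases hx with rfl | hx
      · omega
      · have hcast : j + 1 = ((j.toNat + 1 : Nat) : Int) := by omega
        rw [hcast] at hx
        by_cases hend : j.toNat + 1 ≤ hay.length
        · exact ih (j.toNat + 1) hend x hx
        · rw [pv_findFrom_past hay pat (j.toNat + 1) (by omega), pvFindAll_neg_one] at hx
          simp at hx

-- pvOcc is the find loop started at 0
lemma pvOcc_eq (hay pat : List Char) :
    pvOcc hay pat
      = pvFindAll hay pat (hay.length + 2) (PySem.Chars.findFrom hay pat ((0 : Nat) : Int) none) := by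
  unfold pvOcc
  rw [show (((0 : Nat) : Int)) = 0 by simp, PySem.Chars.findFrom_zero]

lemma pvOcc_mem (hay pat : List Char) (i : Nat) (hi : i < hay.length) :
    ((i : Int) ∈ pvOcc hay pat ↔ pat <+: hay.drop i) := by
  rw [pvOcc_eq]
  rw [pvFindAll_mem hay pat i hi (hay.length + 2) 0 (by omega) (by omega)]
  exact ⟨fun h => h.2, fun h => ⟨Nat.zero_le i, h⟩⟩

lemma pvOcc_bounds (hay pat : List Char) :
    ∀ x ∈ pvOcc hay pat, 0 ≤ x ∧ x ≤ (hay.length : Int) := by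
  rw [pvOcc_eq]
  exact pvFindAll_bounds hay pat (hay.length + 2) 0 (by omega)

-- ---------- set-fold facts ----------
lemma pv_mem_fold_p2 (n : Int) (js : List Int) :
    ∀ (init : PySem.Set Int) (k : Int),
      (k ∈ js.foldl (fun cs j => if j + 2 < n then PySem.Set.add cs (j + 2) else cs) init ↔
        k ∈ init ∨ ∃ j ∈ js, j + 2 < n ∧ k = j + 2) := by
  induction js with
  | nil => intro init k; simp
  | cons j js ih =>
    intro init k
    simp only [List.foldl_cons, List.mem_cons]
    by_cases hp : j + 2 < n
    · rw [if_pos hp, ih, PySem.Set.mem_add]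
      constructor
      · rintro ((h | h) | ⟨j', hj', hpj', rfl⟩)
        · exact Or.inl h
        · exact Or.inr ⟨j, Or.inl rfl, hp, h⟩
        · exact Or.inr ⟨j', Or.inr hj', hpj', rfl⟩
      · rintro (h | ⟨j', (rfl | hj'), hpj', rfl⟩)
        · exact Or.inl (Or.inl h)
        · exact Or.inl (Or.inr rfl)
        · exact Or.inr ⟨j', hj', hpj', rfl⟩
    · rw [if_neg hp, ih]
      constructor
      · rintro (h | ⟨j', hj', hpj', rfl⟩)
        · exact Or.inl h
        · exact Or.inr ⟨j', Or.inr hj', hpj', rfl⟩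
      · rintro (h | ⟨j', (rfl | hj'), hpj', rfl⟩)
        · exact Or.inl h
        · exact absurd hpj' hp
        · exact Or.inr ⟨j', hj', hpj', rfl⟩

lemma pv_mem_fold_id (n : Int) (js : List Int) :
    ∀ (init : PySem.Set Int) (k : Int),
      (k ∈ js.foldl (fun cs j => if j < n then PySem.Set.add cs j else cs) init ↔
        k ∈ init ∨ ∃ j ∈ js, j < n ∧ k = j) := by
  induction js with
  | nil => intro init k; simp
  | cons j js ih =>
    intro init k
    simp only [List.foldl_cons, List.mem_cons]
    by_cases hp : j < n
    · rw [if_pos hp, ih, PySem.Set.mem_add]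
      constructor
      · rintro ((h | h) | ⟨j', hj', hpj', hk⟩)
        · exact Or.inl h
        · exact Or.inr ⟨j, Or.inl rfl, hp, h⟩
        · exact Or.inr ⟨j', Or.inr hj', hpj', hk⟩
      · rintro (h | ⟨j', (rfl | hj'), hpj', hk⟩)
        · exact Or.inl (Or.inl h)
        · exact Or.inl (Or.inr hk)
        · exact Or.inr ⟨j', hj', hpj', hk⟩
    · rw [if_neg hp, ih]
      constructor
      · rintro (h | ⟨j', hj', hpj', hk⟩)
        · exact Or.inl h
        · exact Or.inr ⟨j', Or.inr hj', hpj', hk⟩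
      · rintro (h | ⟨j', (rfl | hj'), hpj', hk⟩)
        · exact Or.inl h
        · exact absurd hpj' hp
        · exact Or.inr ⟨j', hj', hpj', hk⟩

lemma pv_nodup_fold_p2 (n : Int) (js : List Int) :
    ∀ (init : PySem.Set Int), init.Nodup →
      (js.foldl (fun cs j => if j + 2 < n then PySem.Set.add cs (j + 2) else cs) init).Nodup := by
  induction js with
  | nil => intro init h; simpa using h
  | cons j js ih =>
    intro init h
    simp only [List.foldl_cons]
    by_cases hp : j + 2 < n
    · rw [if_pos hp]; exact ih _ (PySem.Set.nodup_add _ _ h)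
    · rw [if_neg hp]; exact ih _ h

lemma pv_nodup_fold_id (n : Int) (js : List Int) :
    ∀ (init : PySem.Set Int), init.Nodup →
      (js.foldl (fun cs j => if j < n then PySem.Set.add cs j else cs) init).Nodup := by
  induction js with
  | nil => intro init h; simpa using h
  | cons j js ih =>
    intro init h
    simp only [List.foldl_cons]
    by_cases hp : j < n
    · rw [if_pos hp]; exact ih _ (PySem.Set.nodup_add _ _ h)
    · rw [if_neg hp]; exact ih _ h

-- ---------- caps characterization ----------
lemma pv_caps_mem (s name : List Char) (k : Int) :
    k ∈ pvCaps s name ↔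
      ((s.length ≠ 0 ∧ k = 0)
        ∨ (∃ pat ∈ [['.', ' '], ['?', ' '], ['!', ' ']],
             ∃ j ∈ pvOcc s pat, j + 2 < (s.length : Int) ∧ k = j + 2)
        ∨ (∃ j ∈ pvOcc (PySem.Chars.lower s) (PySem.Chars.lower name),
             j < (s.length : Int) ∧ k = j)) := by
  unfold pvCaps
  simp only [List.foldl_cons, List.foldl_nil]
  rw [pv_mem_fold_id]
  unfold pvAddPunct
  rw [pv_mem_fold_p2, pv_mem_fold_p2, pv_mem_fold_p2]
  have hc0 : k ∈ (if s.length = 0 then PySem.Set.empty else PySem.Set.ofList [0])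
      ↔ (s.length ≠ 0 ∧ k = 0) := by
    split_ifs with h
    · simp [PySem.Set.empty, h]
    · simp [PySem.Set.ofList, PySem.Set.add, h]
  rw [hc0]
  constructor
  · rintro ((((h0 | ⟨j, hj, hp, rfl⟩) | ⟨j, hj, hp, rfl⟩) | ⟨j, hj, hp, rfl⟩) | ⟨j, hj, hp, hk⟩)
    · exact Or.inl h0
    · exact Or.inr (Or.inl ⟨['.', ' '], by simp, j, hj, hp, rfl⟩)
    · exact Or.inr (Or.inl ⟨['?', ' '], by simp, j, hj, hp, rfl⟩)
    · exact Or.inr (Or.inl ⟨['!', ' '], by simp, j, hj, hp, rfl⟩)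
    · exact Or.inr (Or.inr ⟨j, hj, hp, hk⟩)
  · rintro (h0 | ⟨pat, hpat, j, hj, hp, rfl⟩ | ⟨j, hj, hp, hk⟩)
    · exact Or.inl (Or.inl (Or.inl (Or.inl h0)))
    · simp only [List.mem_cons, List.not_mem_nil, or_false] at hpat
      rcases hpat with rfl | rfl | rfl
      · exact Or.inl (Or.inl (Or.inl (Or.inr ⟨j, hj, hp, rfl⟩)))
      · exact Or.inl (Or.inl (Or.inr ⟨j, hj, hp, rfl⟩))
      · exact Or.inl (Or.inr ⟨j, hj, hp, rfl⟩)
    · exact Or.inr ⟨j, hj, hp, hk⟩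

lemma pv_caps_nodup (s name : List Char) : (pvCaps s name).Nodup := by
  unfold pvCaps
  simp only [List.foldl_cons, List.foldl_nil]
  apply pv_nodup_fold_id
  unfold pvAddPunct
  apply pv_nodup_fold_p2
  apply pv_nodup_fold_p2
  apply pv_nodup_fold_p2
  split_ifs
  · exact List.nodup_nil
  · exact PySem.Set.nodup_ofList (xs := [(0 : Int)])

lemma pv_caps_bounds (s name : List Char) :
    ∀ x ∈ pvCaps s name, 0 ≤ x ∧ x < (s.length : Int) := by
  intro x hx
  rw [pv_caps_mem] at hx
  rcases hx with ⟨h0, rfl⟩ | ⟨pat, _, j, hj, hp, rfl⟩ | ⟨j, hj, hp, hk⟩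
  · constructor
    · omega
    · have : 0 < s.length := Nat.pos_of_ne_zero h0
      omega
  · have := (pvOcc_bounds s pat j hj).1
    omega
  · have := (pvOcc_bounds _ _ j hj).1
    omega

-- ---------- two-character prefix ↔ indexing ----------
lemma pv_prefix_two (s : List Char) (a b : Char) (j : Nat) :
    ([a, b] <+: s.drop j) ↔ (j + 1 < s.length ∧ s.getD j ' ' = a ∧ s.getD (j+1) ' ' = b) := by
  constructor
  · rintro ⟨rest, hr⟩
    have hlen : s.length - j = rest.length + 2 := by
      have := congrArg List.length hr
      simp at this
      omega
    have hj1 : j + 1 < s.length := by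
      by_cases h : j ≤ s.length
      · omega
      · exfalso
        rw [List.drop_eq_nil_of_le (by omega)] at hr
        simp at hr
    refine ⟨hj1, ?_, ?_⟩
    · have h0 : s[j]? = some a := by
        have := congrArg (fun l => l[0]?) hr
        simp only [List.getElem?_drop] at this
        simpa using this.symm
      simp [List.getD_eq_getElem?_getD, h0]
    · have h1 : s[j+1]? = some b := by
        have := congrArg (fun l => l[1]?) hr
        simp only [List.getElem?_drop] at this
        simpa using this.symm
      simp [List.getD_eq_getElem?_getD, h1]
  · rintro ⟨hj1, ha, hb⟩
    have hja : s[j] = a := by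
      have := List.getD_eq_getElem s ' ' (n := j) (by omega)
      rw [ha] at this; exact this.symm
    have hjb : s[j+1] = b := by
      have := List.getD_eq_getElem s ' ' (n := j+1) hj1
      rw [hb] at this; exact this.symm
    have h1 : s.drop j = s[j] :: s.drop (j+1) := List.drop_eq_getElem_cons (by omega)
    have h2 : s.drop (j+1) = s[j+1] :: s.drop (j+2) := List.drop_eq_getElem_cons hj1
    rw [h1, h2, hja, hjb]
    exact ⟨s.drop (j+2), rfl⟩

-- A's name test is a prefix of the lowered text
lemma pv_B3_iff (s name : List Char) (k : Nat) :
    pvB3 s name (k : Int) = true ↔ PySem.Chars.lower name <+: (PySem.Chars.lower s).drop k := by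
  have hslice : PySem.List.slice s (some (k : Int)) (some ((k : Int) + (name.length : Int)))
      = (s.drop k).take name.length := PySem.List.slice_natCast_add s k name.length
  rw [pvB3, hslice, beq_iff_eq, List.prefix_iff_eq_take]
  constructor
  · intro h
    rw [show (PySem.Chars.lower name).length = name.length from by simp [PySem.Chars.lower]]
    rw [← h]
    simp [PySem.Chars.lower, List.map_take, List.map_drop]
  · intro h
    rw [show (PySem.Chars.lower name).length = name.length from by simp [PySem.Chars.lower]] at h
    rw [show PySem.Chars.lower (List.take name.length (List.drop k s))
        = List.take name.length (List.drop k (PySem.Chars.lower s)) from by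
      simp [PySem.Chars.lower, List.map_take, List.map_drop]]
    exact h.symm

-- ---------- caps = A's capitalization condition ----------
lemma pv_caps_spec (s name : List Char) (hhead : s.getD 0 ' ' ≠ ' ')
    (k : Nat) (hk : k < s.length) :
    ((k : Int) ∈ pvCaps s name ↔ (k = 0 ∨ pvB2 s (k : Int) = true ∨ pvB3 s name (k : Int) = true)) := by
  have hlow : (PySem.Chars.lower s).length = s.length := by simp [PySem.Chars.lower]
  rw [pv_caps_mem]
  constructor
  · rintro (⟨h0, hk0⟩ | ⟨pat, hpat, j, hj, hp, hkj⟩ | ⟨j, hj, hp, hkj⟩)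
    · left; exact_mod_cast hk0
    · right; left
      have hj0 : 0 ≤ j := (pvOcc_bounds s pat j hj).1
      have hkge : 2 ≤ k := by omega
      have hjn : j = ((k - 2 : Nat) : Int) := by omega
      rw [hjn] at hj
      simp only [List.mem_cons, List.not_mem_nil, or_false] at hpat
      unfold pvB2
      have e1 : (k : Int) - 1 = ((k - 1 : Nat) : Int) := by omega
      have e2 : (k : Int) - 2 = ((k - 2 : Nat) : Int) := by omega
      rw [e1, e2, PySem.List.pyGetD_natCast, PySem.List.pyGetD_natCast]
      rcases hpat with rfl | rfl | rfl <;>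
      · rw [pvOcc_mem s _ (k-2) (by omega), pv_prefix_two] at hj
        obtain ⟨_, hga, hgb⟩ := hj
        rw [show k - 2 + 1 = k - 1 from by omega] at hgb
        rw [hgb, hga]
        decide
    · right; right
      have hj0 : 0 ≤ j := (pvOcc_bounds _ _ j hj).1
      have hjn : j = (k : Int) := by omega
      rw [hjn] at hj
      rw [pvOcc_mem _ _ k (by omega)] at hj
      exact (pv_B3_iff s name k).mpr hj
  · intro h
    by_cases hk0 : k = 0
    · subst hk0
      exact Or.inl ⟨by omega, by norm_num⟩
    · rcases h with h0 | hb2 | hb3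
      · exact absurd h0 hk0
      · right; left
        have hk2 : 2 ≤ k := by
          by_contra hlt
          have hk1 : k = 1 := by omega
          subst hk1
          unfold pvB2 at hb2
          rw [show ((1 : Nat) : Int) - 1 = ((0 : Nat) : Int) from by norm_num,
              PySem.List.pyGetD_natCast] at hb2
          rw [beq_eq_false_iff_ne.mpr hhead] at hb2
          simp at hb2
        unfold pvB2 at hb2
        have e1 : (k : Int) - 1 = ((k - 1 : Nat) : Int) := by omega
        have e2 : (k : Int) - 2 = ((k - 2 : Nat) : Int) := by omega
        rw [e1, e2, PySem.List.pyGetD_natCast, PySem.List.pyGetD_natCast] at hb2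
        simp only [Bool.and_eq_true, beq_iff_eq, List.contains_iff_mem] at hb2
        obtain ⟨hsp, hpm⟩ := hb2
        refine ⟨[s.getD (k-2) ' ', ' '], ?_, ((k - 2 : Nat) : Int), ?_, by omega, by omega⟩
        · rcases pv_mem_punct _ hpm with h | h | h <;> rw [h] <;> simp
        · rw [pvOcc_mem s _ (k-2) (by omega), pv_prefix_two]
          exact ⟨by omega, rfl, by rw [show k - 2 + 1 = k - 1 from by omega]; exact hsp⟩
      · right; right
        refine ⟨(k : Int), ?_, by omega, rfl⟩
        rw [pvOcc_mem _ _ k (by omega)]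
        exact (pv_B3_iff s name k).mp hb3

-- ---------- applying the capitalization set ----------
lemma pv_applyCaps_getD (is : List Int) : ∀ (s : List Char), is.Nodup →
    (∀ x ∈ is, 0 ≤ x ∧ x < (s.length : Int)) → ∀ k : Nat,
    (is.foldl (fun t i => t.set i.toNat (PySem.Chars.upperChar (t.getD i.toNat ' '))) s).getD k ' '
      = if (k : Int) ∈ is then PySem.Chars.upperChar (s.getD k ' ') else s.getD k ' ' := by
  induction is with
  | nil => intro s _ _ k; simp
  | cons i is ih =>
    intro s hnd hb k
    simp only [List.foldl_cons]
    have hi := hb i (List.mem_cons_self ..)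
    have hilen : i.toNat < s.length := by omega
    set s' := s.set i.toNat (PySem.Chars.upperChar (s.getD i.toNat ' ')) with hs'
    have hlen' : s'.length = s.length := List.length_set ..
    have hb' : ∀ x ∈ is, 0 ≤ x ∧ x < (s'.length : Int) := by
      intro x hx
      rw [hlen']
      exact hb x (List.mem_cons_of_mem _ hx)
    rw [ih s' (List.Nodup.of_cons hnd) hb' k]
    by_cases hki : (k : Int) = i
    · have hkn : k = i.toNat := by omega
      have hnin : (k : Int) ∉ is := by
        rw [hki]
        exact (List.nodup_cons.mp hnd).1
      rw [if_neg hnin, if_pos (by rw [hki]; exact List.mem_cons_self ..)]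
      subst hkn
      rw [hs']
      simp [List.getD_eq_getElem?_getD, List.getElem?_set_self hilen]
    · have hkn : k ≠ i.toNat := by omega
      have hgd : s'.getD k ' ' = s.getD k ' ' := by
        rw [hs']
        simp only [List.getD_eq_getElem?_getD]
        rw [List.getElem?_set_ne (by omega)]
      rw [hgd]
      have hmem : ((k : Int) ∈ i :: is) ↔ ((k : Int) ∈ is) := by
        simp [List.mem_cons, hki]
      by_cases h : (k : Int) ∈ is
      · rw [if_pos h, if_pos (hmem.mpr h)]
      · rw [if_neg h, if_neg (fun hc => h (hmem.mp hc))]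

-- after strip, the first and last characters of a nonempty result are not spaces
lemma pv_head_dropWhile {p : Char → Bool} {l : List Char} {c : Char}
    (h : (List.dropWhile p l).head? = some c) : p c = false := by
  induction l with
  | nil => simp [List.dropWhile] at h
  | cons a l ih =>
    by_cases hpa : p a = true
    · rw [List.dropWhile_cons, if_pos hpa] at h; exact ih h
    · rw [List.dropWhile_cons, if_neg hpa] at h
      simp only [List.head?_cons, Option.some.injEq] at h
      rw [← h]
      simpa using hpa

lemma pv_strip_prefix (cs : List Char) :
    PySem.Chars.strip cs <+: PySem.Chars.lstrip cs := by
  show PySem.Chars.rstrip (PySem.Chars.lstrip cs) <+: PySem.Chars.lstrip cs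
  set t := PySem.Chars.lstrip cs
  have hsuf : List.dropWhile PySem.Chars.isspace t.reverse <:+ t.reverse :=
    List.dropWhile_suffix _
  have h1 := List.reverse_prefix.mpr hsuf
  rw [List.reverse_reverse] at h1
  exact h1

lemma pv_strip_head (cs : List Char) (h : PySem.Chars.strip cs ≠ []) :
    (PySem.Chars.strip cs).getD 0 ' ' ≠ ' ' := by
  obtain ⟨u, hu⟩ := pv_strip_prefix cs
  obtain ⟨c, l, hcl⟩ : ∃ c l, PySem.Chars.strip cs = c :: l := by
    cases hsc : PySem.Chars.strip cs with
    | nil => exact absurd hsc h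
    | cons c l => exact ⟨c, l, rfl⟩
  have hh : (PySem.Chars.lstrip cs).head? = some c := by
    rw [← hu, List.head?_append_of_ne_nil _ (by rw [hcl]; simp), hcl]; rfl
  have hns : PySem.Chars.isspace c = false := pv_head_dropWhile hh
  rw [hcl]
  simp only [List.getD, List.getElem?_cons_zero, Option.getD_some]
  intro hc
  rw [hc] at hns
  exact absurd hns (by decide)

lemma pv_strip_last (cs : List Char) (h : PySem.Chars.strip cs ≠ []) :
    (PySem.Chars.strip cs).getD ((PySem.Chars.strip cs).length - 1) ' ' ≠ ' ' := by
  have hrev : (PySem.Chars.strip cs).reverse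
      = List.dropWhile PySem.Chars.isspace (PySem.Chars.lstrip cs).reverse := by
    simp [PySem.Chars.strip, PySem.Chars.rstrip]
  obtain ⟨c, hc⟩ : ∃ c, (PySem.Chars.strip cs).getLast? = some c := by
    cases hgl : (PySem.Chars.strip cs).getLast? with
    | none => exact absurd (List.getLast?_eq_none_iff.mp hgl) h
    | some c => exact ⟨c, rfl⟩
  have hcd : (PySem.Chars.strip cs).getD ((PySem.Chars.strip cs).length - 1) ' ' = c := by
    rw [List.getD_eq_getElem?_getD, ← List.getLast?_eq_getElem?, hc]; rfl
  have hns : PySem.Chars.isspace c = false := by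
    apply pv_head_dropWhile (l := (PySem.Chars.lstrip cs).reverse)
    rw [← hrev, ← List.getLast?_eq_head?_reverse]
    exact hc
  rw [hcd]
  intro hceq
  rw [hceq] at hns
  exact absurd hns (by decide)

-- ---------- the per-index outputs of A and B agree ----------
-- the body of B's output loop, reshaped into "append one chunk"
lemma pv_stepB (t : List Char) (n : Int) (out : List Char) (i : Int) :
    (let c := PySem.List.pyGetD t i ' '
     let out2 := out ++ [c]
     if (c == 'a') && decide (i + 3 < n) && (PySem.List.pyGetD t (i+1) ' ' == ' ')
         && List.contains "8aef".toList (PySem.Chars.lowerChar (PySem.List.pyGetD t (i+2) ' '))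
         && List.contains "0123456789+-.!? ".toList (PySem.List.pyGetD t (i+3) ' ')
       then out2 ++ ['n'] else out2)
      = out ++ pvChunkB t n i := by
  simp only [pvChunkB]
  split_ifs
  · simp
  · rfl

set_option maxHeartbeats 1000000 in
lemma pv_chunk_eq (s name : List Char)
    (hhead : s.getD 0 ' ' ≠ ' ') (hlast : s.getD (s.length - 1) ' ' ≠ ' ')
    (hsafe : pvRaisesBcore s name = false) (k : Nat) (hk : k < s.length) :
    pvChunkA s name (k : Int)
      = pvChunkB (pvApplyCaps s (pvCaps s name)) (s.length : Int) (k : Int) := by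
  have hnd := pv_caps_nodup s name
  have hb := pv_caps_bounds s name
  have htget : ∀ m : Nat, (pvApplyCaps s (pvCaps s name)).getD m ' '
      = if (m : Int) ∈ pvCaps s name then PySem.Chars.upperChar (s.getD m ' ') else s.getD m ' ' := by
    intro m
    unfold pvApplyCaps
    exact pv_applyCaps_getD (pvCaps s name) s hnd hb m
  set t := pvApplyCaps s (pvCaps s name) with ht
  by_cases hcap : (k : Int) ∈ pvCaps s name
  · -- a capitalized position: both sides output the uppercased character
    have hspec := (pv_caps_spec s name hhead k hk).mp hcap
    have hc : PySem.List.pyGetD t (k : Int) ' ' = PySem.Chars.upperChar (s.getD k ' ') := by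
      rw [PySem.List.pyGetD_natCast, htget k, if_pos hcap]
    have hB : pvChunkB t (s.length : Int) (k : Int)
        = [PySem.Chars.upperChar (s.getD k ' ')] := by
      unfold pvChunkB
      rw [hc, pv_up_ne_a]
      simp
    have hA : pvChunkA s name (k : Int) = [PySem.Chars.upperChar (s.getD k ' ')] := by
      have hg : PySem.List.pyGetD s ((k : Nat) : Int) ' ' = s.getD k ' ' :=
        PySem.List.pyGetD_natCast s k ' '
      unfold pvChunkA
      by_cases h0 : (k : Int) = 0
      · rw [if_pos (by simpa using h0), ← h0, hg]
      · rw [if_neg (by simpa using h0)]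
        rcases hspec with rfl | h2 | h3
        · exfalso; exact h0 (by norm_num)
        · rw [if_pos h2, hg]
        · by_cases h2 : pvB2 s (k : Int) = true
          · rw [if_pos h2, hg]
          · rw [if_neg h2, if_pos h3, hg]
    rw [hA, hB]
  · -- not capitalized: the character is unchanged and the article rules coincide
    have hspec := (pv_caps_spec s name hhead k hk).not.mp hcap
    push_neg at hspec
    obtain ⟨h0, h2x, h3x⟩ := hspec
    have h2' : pvB2 s (k : Int) = false := by simpa using h2x
    have h3' : pvB3 s name (k : Int) = false := by simpa using h3x
    have hc : PySem.List.pyGetD t (k : Int) ' ' = s.getD k ' ' := by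
      rw [PySem.List.pyGetD_natCast, htget k, if_neg hcap]
    have hA0 : ((k : Int) == 0) = false := by
      simp only [beq_eq_false_iff_ne, ne_eq]
      intro hh; exact h0 (by exact_mod_cast hh)
    unfold pvChunkA pvChunkB
    rw [hA0]
    simp only [Bool.false_eq_true, if_false, h2', h3']
    rw [hc, PySem.List.pyGetD_natCast s]
    have e1 : (k : Int) + 1 = ((k+1 : Nat) : Int) := by push_cast; ring
    have e2 : (k : Int) + 2 = ((k+2 : Nat) : Int) := by push_cast; ring
    have e3 : (k : Int) + 3 = ((k+3 : Nat) : Int) := by push_cast; ring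
    by_cases hbnd : k + 3 < s.length
    · have hdec : decide ((k : Int) + 3 < (s.length : Int)) = true := by
        simp only [decide_eq_true_eq]; exact_mod_cast hbnd
      have hsp : (PySem.List.pyGetD t ((k : Int)+1) ' ' == ' ')
          = (PySem.List.pyGetD s ((k : Int)+1) ' ' == ' ') := by
        rw [e1, PySem.List.pyGetD_natCast, PySem.List.pyGetD_natCast, htget (k+1)]
        split_ifs with h
        · exact pv_up_space _
        · rfl
      have hlc : PySem.Chars.lowerChar (PySem.List.pyGetD t ((k : Int)+2) ' ')
          = PySem.Chars.lowerChar (PySem.List.pyGetD s ((k : Int)+2) ' ') := by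
        rw [e2, PySem.List.pyGetD_natCast, PySem.List.pyGetD_natCast, htget (k+2)]
        split_ifs with h
        · exact pv_lower_up _
        · rfl
      have hcl : List.contains "0123456789+-.!? ".toList (PySem.List.pyGetD t ((k : Int)+3) ' ')
          = List.contains "0123456789+-.!? ".toList (PySem.List.pyGetD s ((k : Int)+3) ' ') := by
        rw [e3, PySem.List.pyGetD_natCast, PySem.List.pyGetD_natCast, htget (k+3)]
        split_ifs with h
        · exact pv_up_class _
        · rfl
      rw [hdec, hsp, hlc, hcl]
      simp only [Bool.and_true]
      by_cases hcond : ((PySem.List.pyGetD s (k : Int) ' ' == 'a')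
          && (PySem.List.pyGetD s ((k : Int)+1) ' ' == ' ')
          && List.contains "8aef".toList (PySem.Chars.lowerChar (PySem.List.pyGetD s ((k : Int)+2) ' '))
          && List.contains "0123456789+-.!? ".toList (PySem.List.pyGetD s ((k : Int)+3) ' ')) = true
      · have ha : s.getD k ' ' = 'a' := by
          have := hcond
          simp only [Bool.and_eq_true, beq_iff_eq] at this
          rw [← PySem.List.pyGetD_natCast s k ' ']
          exact this.1.1.1
        rw [PySem.List.pyGetD_natCast s] at hcond
        rw [if_pos hcond, if_pos hcond, ha]
      · rw [PySem.List.pyGetD_natCast s] at hcond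
        rw [if_neg hcond, if_neg hcond]
    · -- within three characters of the end: both article conditions are false
      have hdec : decide ((k : Int) + 3 < (s.length : Int)) = false := by
        simp only [decide_eq_false_iff_not]
        intro hcon; exact hbnd (by exact_mod_cast hcon)
      rw [hdec]
      have hA4 : ((s.getD k ' ' == 'a')
          && (PySem.List.pyGetD s ((k : Int)+1) ' ' == ' ')
          && List.contains "8aef".toList (PySem.Chars.lowerChar (PySem.List.pyGetD s ((k : Int)+2) ' '))
          && List.contains "0123456789+-.!? ".toList (PySem.List.pyGetD s ((k : Int)+3) ' ')) = false := by
        have h3cases : k = s.length - 1 ∨ k = s.length - 2 ∨ k = s.length - 3 := by omega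
        rcases h3cases with hcs | hcs | hcs
        · have ho1 : PySem.List.pyGetD s ((k : Int)+1) ' ' = ' ' := by
            rw [e1, PySem.List.pyGetD_natCast, List.getD_eq_getElem?_getD,
                List.getElem?_eq_none (by omega)]
            rfl
          have ho2 : PySem.List.pyGetD s ((k : Int)+2) ' ' = ' ' := by
            rw [e2, PySem.List.pyGetD_natCast, List.getD_eq_getElem?_getD,
                List.getElem?_eq_none (by omega)]
            rfl
          rw [ho1, ho2, show PySem.Chars.lowerChar ' ' = ' ' from rfl]
          simp
        · have hb1 : (PySem.List.pyGetD s ((k : Int)+1) ' ' == ' ') = false := by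
            apply beq_eq_false_iff_ne.mpr
            rw [e1, PySem.List.pyGetD_natCast, show k+1 = s.length - 1 from by omega]
            exact hlast
          rw [hb1]
          simp
        · have hn4 : 4 ≤ s.length := by omega
          cases ha : (s.getD k ' ' == 'a') with
          | false => simp
          | true =>
            cases hb1 : (PySem.List.pyGetD s ((k : Int)+1) ' ' == ' ') with
            | false => simp
            | true =>
              cases h8 : List.contains "8aef".toList
                  (PySem.Chars.lowerChar (PySem.List.pyGetD s ((k : Int)+2) ' ')) with
              | false => simp
              | true =>
                exfalso
                have f1 : ((s.length : Int) - 3) = (k : Int) := by omega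
                have f2 : ((s.length : Int) - 2) = ((k : Int) + 1) := by omega
                have f3 : ((s.length : Int) - 1) = ((k : Int) + 2) := by omega
                have ha' : (PySem.List.pyGetD s (k : Int) ' ' == 'a') = true := by
                  rw [PySem.List.pyGetD_natCast]; exact ha
                have htrue : pvRaisesBcore s name = true := by
                  simp only [pvRaisesBcore]
                  rw [f1, f2, f3, ha', hb1, h8, h2', h3']
                  simp [hn4]
                rw [hsafe] at htrue
                exact Bool.false_ne_true htrue
      rw [hA4]
      simp

-- ===== VERDICT (by name: the statement is the Claim_ definition above) =====
set_option maxHeartbeats 1000000 in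
theorem check_grammar_spec : Claim_equal_check_grammar := by
  intro c nm _ hpre
  unfold Pre_check_grammar pvRaisesB at hpre
  unfold Spec_check_grammar
  simp only [check_grammar, check_grammar_alt]
  have hlen' : PySem.List.len (PySem.Chars.strip c.toList)
      = (((PySem.Chars.strip c.toList).length : Nat) : Int) := by
    simp [PySem.List.len]
  rw [hlen']
  congr 1
  apply PySem.List.foldl_congr_mem
  intro acc x hx
  rw [PySem.List.mem_pyRange_one] at hx
  obtain ⟨hx0, hxn⟩ := hx
  have hxk : x = ((x.toNat : Nat) : Int) := by omega
  have hkn : x.toNat < (PySem.Chars.strip c.toList).length := by omega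
  have hne : PySem.Chars.strip c.toList ≠ [] := by
    intro hnil
    rw [hnil] at hkn
    simp at hkn
  rw [pv_stepB, hxk]
  exact congrArg (acc ++ ·)
    (pv_chunk_eq _ _ (pv_strip_head _ hne) (pv_strip_last _ hne) hpre _ hkn)

theorem check_grammar_raises : Claim_raises_check_grammar := by
  unfold Claim_raises_check_grammar
  constructor
  · intro c nm _ hr hp
    unfold Raises_check_grammar at hr
    unfold Pre_check_grammar at hp
    rw [hp] at hr
    exact Bool.false_ne_true hr
  · exact ⟨by decide, by decide, by decide⟩

-- self-check: the crash-fix witness value stated above is the one B's port returns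
theorem pv_raise_witness_ok :
    check_grammar_alt (pvRaiseWitness_check_grammar.1) (pvRaiseWitness_check_grammar.2)
      = pvRaiseWitnessOut_check_grammar := by
  have h := check_grammar_raises
  unfold Claim_raises_check_grammar at h
  exact h.2.2.2
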